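-- pv_equiv track=rewrite | github.com/anastazjagradowska/Python-course | Lab7/Lab7.py | gen_perfect
-- ===== SOURCE A (Python) =====
-- def gen_perfect(seq):
--   for elem in seq:
--     count = 0
--     for i in range(1, elem):
--       if elem % i == 0:
--         count += i
--
--     if count == elem:
--       yield elem
-- ===== SOURCE B (Python) =====
-- def gen_perfect(seq):
--     for elem in seq:
--         if elem <= 1:
--             s = 0
--         else:
--             s = 1
--             i = 2
--             while i * i < elem:
--                 if elem % i == 0:
--                     s += i + elem // i
--                 i += 1
--             if i * i == elem:
--                 s += i
--         if s == elem:
--             yield elem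
-- ===== Notes on version B (the rewrite author's own statement) =====
-- stated objective: faster
-- what changed: Replaces the O(elem) scan of all candidates 1..elem-1 with a divisor-sum loop to sqrt(elem) that adds each divisor pair (i, elem//i) at once, special-casing elem <= 1.
import Mathlib
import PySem

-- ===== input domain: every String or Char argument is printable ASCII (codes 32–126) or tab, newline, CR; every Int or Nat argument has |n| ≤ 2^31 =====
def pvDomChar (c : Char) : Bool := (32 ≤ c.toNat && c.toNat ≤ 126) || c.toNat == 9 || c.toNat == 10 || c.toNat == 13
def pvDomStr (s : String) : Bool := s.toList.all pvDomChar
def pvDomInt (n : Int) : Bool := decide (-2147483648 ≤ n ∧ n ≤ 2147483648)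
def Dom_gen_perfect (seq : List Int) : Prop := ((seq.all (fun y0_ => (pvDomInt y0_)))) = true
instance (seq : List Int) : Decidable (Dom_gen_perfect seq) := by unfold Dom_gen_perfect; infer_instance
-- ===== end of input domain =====

-- B replaces A's O(elem) scan over 1..elem-1 with a divisor-pairing loop up to sqrt(elem) (objective: faster).

-- ===== PORT A =====
-- proper-divisor sum of elem by A's full scan: for i in range(1, elem): if elem % i == 0: count += i
def aCount (elem : Int) : Int :=
  (PySem.List.pyRange 1 elem 1).foldl
    (fun count i => if PySem.Int.mod elem i == 0 then count + i else count) 0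

def gen_perfect (seq : List Int) : List Int :=
  seq.foldl (fun acc elem => if aCount elem == elem then acc ++ [elem] else acc) []

-- ===== PORT B =====
-- B's while loop: while i*i < elem: if elem % i == 0: s += i + elem // i; i += 1; then if i*i == elem: s += i
def bLoop (elem i s : Int) : Int :=
  if h : i * i < elem then
    bLoop elem (i + 1) (if PySem.Int.mod elem i == 0 then s + i + PySem.Int.floordiv elem i else s)
  else if i * i == elem then s + i else s
termination_by (elem - i).toNat
decreasing_by
  have hi : i < elem := by nlinarith [sq_nonneg i, sq_nonneg (i - 1)]
  omega

def bCount (elem : Int) : Int :=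
  if elem ≤ 1 then 0 else bLoop elem 2 1

def gen_perfect_alt (seq : List Int) : List Int :=
  seq.foldl (fun acc elem => if bCount elem == elem then acc ++ [elem] else acc) []

-- ===== PRECONDITION & SPEC =====
def Spec_gen_perfect (seq : List Int) (out : List Int) : Prop := out = gen_perfect_alt seq
instance (seq : List Int) (out : List Int) : Decidable (Spec_gen_perfect seq out) := by unfold Spec_gen_perfect; infer_instance

-- ===== CLAIM (what is proved, stated in full; the proofs are below) =====
def Claim_equal_gen_perfect : Prop := ∀ (seq : List Int), Dom_gen_perfect seq → Spec_gen_perfect seq (gen_perfect seq)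

-- ===== LEMMAS AND PROOFS =====

theorem foldl_if_add (p : Int → Bool) :
    ∀ (l : List Int) (c : Int),
      l.foldl (fun c i => if p i then c + i else c) c
        = c + (l.map (fun i => if p i then i else 0)).sum := by
  intro l
  induction l with
  | nil => intro c; simp
  | cons a t ih => intro c; by_cases h : p a <;> simp [h, ih] <;> ring

theorem aCount_eq (n : ℕ) (hn : 2 ≤ n) :
    aCount (n : Int) = ((∑ d ∈ n.properDivisors, d : ℕ) : Int) := by
  unfold aCount
  rw [PySem.List.pyRange_one, foldl_if_add]
  have h1 : ((n : Int) - 1).toNat = n - 1 := by omega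
  rw [h1, zero_add, List.map_map]
  have h2 : ((List.range (n-1)).map ((fun i => if PySem.Int.mod ↑n i == 0 then i else 0) ∘ (fun k : ℕ => (1:ℤ) + ↑k))).sum
      = ∑ k ∈ Finset.range (n-1), (if (1+k) ∣ n then ((1+k : ℕ) : ℤ) else 0) := by
    rw [show ∀ (g : ℕ → ℤ), ((List.range (n-1)).map g).sum = ∑ k ∈ Finset.range (n-1), g k from fun g => rfl]
    refine Finset.sum_congr rfl (fun k _ => ?_)
    simp only [Function.comp]
    have hmod : (PySem.Int.mod (↑n) (1 + (k:ℤ)) = 0) ↔ (1+k) ∣ n := by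
      rw [PySem.Int.mod_eq_zero_iff_dvd]
      constructor
      · intro h
        exact_mod_cast (show ((1+k:ℕ):ℤ) ∣ (n:ℤ) by push_cast; exact h)
      · intro h
        have h2 := Int.natCast_dvd_natCast.mpr h
        push_cast at h2; exact h2
    by_cases h : (1+k) ∣ n
    · simp only [beq_iff_eq, hmod, h, if_true]; push_cast; ring
    · simp only [beq_iff_eq, hmod, h, if_false]
  rw [h2]
  have h3 : n.properDivisors = (Finset.Ico 1 n).filter (· ∣ n) := rfl
  rw [h3, Finset.sum_filter, Finset.sum_Ico_eq_sum_range]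
  push_cast
  simp [add_comm]

def smallDiv (n j : ℕ) : Finset ℕ := (Finset.Ico j n).filter (fun d => d ∣ n ∧ d * d < n)

theorem mem_smallDiv (n j d : ℕ) : d ∈ smallDiv n j ↔ j ≤ d ∧ d ∣ n ∧ d * d < n := by
  unfold smallDiv
  simp [Finset.mem_filter, Finset.mem_Ico]
  intro _ _ h
  nlinarith

theorem smallDiv_step_dvd (n j : ℕ) (h1 : 1 ≤ j) (hlt : j * j < n) (hd : j ∣ n) :
    smallDiv n j = insert j (smallDiv n (j+1)) := by
  ext d
  simp [mem_smallDiv]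
  constructor
  · rintro ⟨h2, h3, h4⟩
    by_cases hdj : d = j
    · left; exact hdj
    · right; exact ⟨by omega, h3, h4⟩
  · rintro (rfl | ⟨h2, h3, h4⟩)
    · exact ⟨le_refl _, hd, hlt⟩
    · exact ⟨by omega, h3, h4⟩

theorem smallDiv_step_ndvd (n j : ℕ) (hd : ¬ j ∣ n) :
    smallDiv n j = smallDiv n (j+1) := by
  ext d
  simp only [mem_smallDiv]
  constructor
  · rintro ⟨h2, h3, h4⟩
    by_cases hdj : d = j
    · exact absurd (hdj ▸ h3) hd
    · exact ⟨by omega, h3, h4⟩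
  · rintro ⟨h2, h3, h4⟩; exact ⟨by omega, h3, h4⟩

theorem bLoop_eq (n : ℕ) (hn : 2 ≤ n) :
    ∀ (m j : ℕ), n - j ≤ m → 1 ≤ j → ∀ (s : Int),
      bLoop (n : Int) (j : Int) s
        = s + ((∑ d ∈ smallDiv n j, (d + n / d) : ℕ) : Int)
            + (if n.sqrt * n.sqrt = n ∧ j ≤ n.sqrt then (n.sqrt : Int) else 0) := by
  intro m
  induction m with
  | zero =>
    intro j hm hj s
    have hjn : n ≤ j := by omega
    have hgt : n < j * j := by nlinarith
    have hempty : smallDiv n j = ∅ := by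
      ext d; simp [mem_smallDiv]; intro h2 _; nlinarith
    rw [bLoop]
    have hnotlt : ¬ ((j:ℤ) * ↑j < ↑n) := by exact_mod_cast not_lt.mpr (le_of_lt hgt)
    rw [dif_neg hnotlt]
    have hne : ¬ ((j:ℤ) * ↑j = ↑n) := by exact_mod_cast Nat.ne_of_gt hgt
    have htail : ¬ (n.sqrt * n.sqrt = n ∧ j ≤ n.sqrt) := by
      rintro ⟨h1, h2⟩; nlinarith
    simp [hne, htail, hempty]
  | succ m ih =>
    intro j hm hj s
    rw [bLoop]
    by_cases hlt : j * j < n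
    · have hltz : ((j:ℤ)) * ↑j < ↑n := by exact_mod_cast hlt
      rw [dif_pos hltz]
      have hjn : j < n := by nlinarith
      have hrec := ih (j+1) (by omega) (by omega)
      have hcast : ((j:ℤ)) + 1 = ((j+1 : ℕ) : ℤ) := by push_cast; ring
      rw [hcast]
      have htail : (if n.sqrt * n.sqrt = n ∧ (j+1) ≤ n.sqrt then ((n.sqrt : ℕ) : ℤ) else 0)
          = (if n.sqrt * n.sqrt = n ∧ j ≤ n.sqrt then ((n.sqrt : ℕ) : ℤ) else 0) := by
        by_cases hsq : n.sqrt * n.sqrt = n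
        · have hjlt : j < n.sqrt := by
            by_contra hc
            push_neg at hc
            nlinarith
          simp [hsq, Nat.le_of_lt hjlt, Nat.succ_le_of_lt hjlt]
        · simp [hsq]
      by_cases hdvd : j ∣ n
      · have hmod : PySem.Int.mod (↑n) (↑j) = 0 := by
          rw [PySem.Int.mod_eq_zero_iff_dvd]
          exact_mod_cast Int.natCast_dvd_natCast.mpr hdvd
        rw [if_pos (by simp [hmod])]
        rw [hrec]
        rw [smallDiv_step_dvd n j hj hlt hdvd]
        rw [Finset.sum_insert (by simp [mem_smallDiv])]
        rw [htail]
        have hfd : PySem.Int.floordiv (↑n) (↑j) = ((n / j : ℕ) : ℤ) := PySem.Int.floordiv_natCast n j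
        rw [hfd]
        push_cast
        ring
      · have hmod : ¬ (PySem.Int.mod (↑n) (↑j) = 0) := by
          rw [PySem.Int.mod_eq_zero_iff_dvd]
          intro h
          exact hdvd (by exact_mod_cast h)
        rw [if_neg (by simp only [beq_iff_eq]; exact hmod)]
        rw [hrec, smallDiv_step_ndvd n j hdvd, htail]
    · have hnotlt : ¬ ((j:ℤ) * ↑j < ↑n) := by exact_mod_cast hlt
      rw [dif_neg hnotlt]
      have hempty : smallDiv n j = ∅ := by
        ext d; simp [mem_smallDiv]; intro h2 _; nlinarith
      by_cases heq : j * j = n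
      · have heqz : ((j:ℤ) * ↑j = ↑n) := by exact_mod_cast heq
        have hsqrt : n.sqrt = j := by
          rw [← heq]
          simpa [pow_two] using Nat.sqrt_eq' j
        have hjs : 1 ≤ n.sqrt := by omega
        simp [heqz, hempty, hsqrt, heq]
      · have hgt : n < j * j := by omega
        have hne : ¬ ((j:ℤ) * ↑j = ↑n) := by exact_mod_cast heq
        have htail : ¬ (n.sqrt * n.sqrt = n ∧ j ≤ n.sqrt) := by
          rintro ⟨h1, h2⟩; nlinarith
        simp [hne, htail, hempty]

theorem pairing (n : ℕ) (hn : 2 ≤ n) :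
    1 + (∑ d ∈ smallDiv n 2, (d + n / d))
      + (if n.sqrt * n.sqrt = n ∧ 2 ≤ n.sqrt then n.sqrt else 0)
      = ∑ d ∈ n.properDivisors, d := by
  have hn0 : n ≠ 0 := by omega
  set S₁ : Finset ℕ := n.divisors.filter (fun d => d * d < n) with hS₁
  set mid : Finset ℕ := n.divisors.filter (fun d => ¬ d * d < n ∧ d * d = n) with hmid
  set L : Finset ℕ := n.divisors.filter (fun d => ¬ d * d < n ∧ ¬ d * d = n) with hL
  have memS₁ : ∀ d, d ∈ S₁ ↔ d ∣ n ∧ d * d < n := by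
    intro d; simp [hS₁, Nat.mem_divisors, hn0, and_assoc]
  have memL : ∀ d, d ∈ L ↔ d ∣ n ∧ n < d * d := by
    intro d; simp [hL, Nat.mem_divisors, hn0]; omega
  -- (a) S₁ = insert 1 (smallDiv n 2)
  have hins : S₁ = insert 1 (smallDiv n 2) := by
    ext d
    simp [memS₁, mem_smallDiv]
    constructor
    · rintro ⟨h1, h2⟩
      have : 1 ≤ d := Nat.pos_of_dvd_of_pos h1 (by omega)
      by_cases hd1 : d = 1
      · left; exact hd1
      · right; exact ⟨by omega, h1, h2⟩
    · rintro (rfl | ⟨_, h1, h2⟩)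
      · exact ⟨one_dvd n, by omega⟩
      · exact ⟨h1, h2⟩
  have h1n : (1:ℕ) ∉ smallDiv n 2 := by simp [mem_smallDiv]
  -- (c) sum of cofactors over S₁ equals sum over L
  have hcof : ∑ d ∈ S₁, n / d = ∑ d ∈ L, d := by
    refine Finset.sum_nbij' (i := fun d => n / d) (j := fun d => n / d) ?_ ?_ ?_ ?_ ?_
    · intro a ha
      rw [memS₁] at ha
      obtain ⟨hd, hlt⟩ := ha
      have ha0 : 0 < a := Nat.pos_of_dvd_of_pos hd (by omega)
      have hq0 : 0 < n / a := Nat.div_pos (Nat.le_of_dvd (by omega) hd) ha0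
      have hmul : a * (n / a) = n := Nat.mul_div_cancel' hd
      rw [memL]
      exact ⟨Nat.div_dvd_of_dvd hd, by nlinarith⟩
    · intro b hb
      rw [memL] at hb
      obtain ⟨hd, hgt⟩ := hb
      have hb0 : 0 < b := Nat.pos_of_dvd_of_pos hd (by omega)
      have hq0 : 0 < n / b := Nat.div_pos (Nat.le_of_dvd (by omega) hd) hb0
      have hmul : b * (n / b) = n := Nat.mul_div_cancel' hd
      rw [memS₁]
      exact ⟨Nat.div_dvd_of_dvd hd, by nlinarith⟩
    · intro a ha
      rw [memS₁] at ha
      exact Nat.div_div_self ha.1 hn0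
    · intro b hb
      rw [memL] at hb
      exact Nat.div_div_self hb.1 hn0
    · intro a _; rfl
  -- (d) mid sum equals the sqrt term
  have hmidsum : (∑ d ∈ mid, d) = (if n.sqrt * n.sqrt = n ∧ 2 ≤ n.sqrt then n.sqrt else 0) := by
    by_cases hsq : n.sqrt * n.sqrt = n
    · have hs2 : 2 ≤ n.sqrt := by nlinarith [Nat.sqrt_le_self n]
      have : mid = {n.sqrt} := by
        ext d
        simp [hmid, Nat.mem_divisors, hn0]
        constructor
        · rintro ⟨hd, _, heq⟩
          nlinarith [Nat.mul_self_inj (m := d) (n := n.sqrt)]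
        · rintro rfl
          exact ⟨⟨n.sqrt, hsq.symm⟩, by omega, hsq⟩
      rw [this]
      simp [hsq, hs2]
    · have : mid = ∅ := by
        ext d
        simp [hmid, Nat.mem_divisors, hn0]
        intro hd hge heq
        have hsd : n.sqrt = d := by rw [← heq]; simpa [pow_two] using Nat.sqrt_eq' d
        exact hsq (by rw [hsd, heq])
      simp [this, hsq]
  -- (e) divisors split into S₁, mid, L
  have hsplit : ∑ d ∈ n.divisors, d = (∑ d ∈ S₁, d) + ((∑ d ∈ mid, d) + (∑ d ∈ L, d)) := by
    rw [← Finset.sum_filter_add_sum_filter_not n.divisors (fun d => d * d < n) (fun d => d)]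
    congr 1
    rw [← Finset.sum_filter_add_sum_filter_not (n.divisors.filter (fun d => ¬ d * d < n)) (fun d => d * d = n) (fun d => d)]
    congr 1 <;> rw [Finset.filter_filter]
  -- (f)
  have hproper : ∑ d ∈ n.divisors, d = (∑ d ∈ n.properDivisors, d) + n :=
    Nat.sum_divisors_eq_sum_properDivisors_add_self.symm ▸ rfl
  -- combine
  have hS₁sum : ∑ d ∈ S₁, (d + n / d) = (1 + n) + ∑ d ∈ smallDiv n 2, (d + n / d) := by
    rw [hins, Finset.sum_insert h1n]
    simp
  have hdist : ∑ d ∈ S₁, (d + n / d) = (∑ d ∈ S₁, d) + (∑ d ∈ S₁, n / d) := Finset.sum_add_distrib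
  omega

theorem count_agree (elem : Int) : aCount elem = bCount elem := by
  by_cases h : elem ≤ 1
  · unfold aCount bCount
    rw [PySem.List.pyRange_one_eq_nil h, if_pos h]
    rfl
  · push_neg at h
    obtain ⟨n, rfl⟩ : ∃ n : ℕ, elem = ↑n := ⟨elem.toNat, by omega⟩
    have hn : 2 ≤ n := by exact_mod_cast h
    rw [aCount_eq n hn]
    unfold bCount
    rw [if_neg (by push_cast; omega)]
    have h2 : ((2:ℤ)) = ((2:ℕ):ℤ) := by norm_num
    rw [h2, bLoop_eq n hn n 2 (by omega) (by omega) 1]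
    rw [← pairing n hn]
    by_cases hsq : n.sqrt * n.sqrt = n ∧ 2 ≤ n.sqrt
    · simp only [if_pos hsq]; push_cast; ring
    · simp only [if_neg hsq]; push_cast; ring

-- ===== VERDICT (by name: the statement is the Claim_ definition above) =====
theorem gen_perfect_spec : Claim_equal_gen_perfect := by
  intro seq _
  unfold Spec_gen_perfect gen_perfect gen_perfect_alt
  rw [funext count_agree]
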